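-- pv_equiv track=rewrite | github.com/struggling-student/PythonExercises | PythonExercises/Esami/2021-2022/Esame-4/examPY/program.andrea.py | genera_foglie
-- ===== SOURCE A (Python) =====
-- def genera_foglie(S):
--     if len(S) < 3:
--         return { S }
--     mosse = [ i for i in range(len(S)-2) if not set(S[i:i+3])-{'1','0'} ]
--     if mosse:
--         return { f for m in mosse for f in genera_foglie(applica_mossa(S,m)) }
--     else:
--         return { S }
--
-- def applica_mossa(S,i):
--     prima,tripla,dopo = S[:i],S[i:i+3],S[i+3:]
--     num = str(int(tripla,base=2))
--     ris = prima+num+dopo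
--     return ris
-- ===== SOURCE B (Python) =====
-- def genera_foglie(S):
--     # Memoized recursion with a direct index scan: each distinct reachable string is
--     # reduced once, moves are found by checking the three characters in place, and the
--     # replacement digit is computed arithmetically instead of via int(...,2)/str.
--     cache = {}
--     return _leaves(S, cache)
--
-- def _leaves(s, cache):
--     r = cache.get(s)
--     if r is not None:
--         return r
--     acc = set()
--     moved = False
--     for i in range(len(s) - 2):
--         a, b, c = s[i], s[i + 1], s[i + 2]
--         if a in '01' and b in '01' and c in '01':
--             moved = True
--             v = 4 * (a == '1') + 2 * (b == '1') + (c == '1')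
--             child = s[:i] + chr(48 + v) + s[i + 3:]
--             acc |= _leaves(child, cache)
--     r = acc if moved else {s}
--     cache[s] = r
--     return r
-- ===== Notes on version B (the rewrite author's own statement) =====
-- stated objective: alternative
-- what changed: B memoizes the reduction on the string (a cache threaded through the recursion, so each distinct reachable string is reduced once instead of once per overlapping branch) and replaces A's slice/set-difference move search and int(tripla,2)/str round-trip by a single index scan that checks the three characters in place and computes the replacement digit arithmetically.
import Mathlib
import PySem

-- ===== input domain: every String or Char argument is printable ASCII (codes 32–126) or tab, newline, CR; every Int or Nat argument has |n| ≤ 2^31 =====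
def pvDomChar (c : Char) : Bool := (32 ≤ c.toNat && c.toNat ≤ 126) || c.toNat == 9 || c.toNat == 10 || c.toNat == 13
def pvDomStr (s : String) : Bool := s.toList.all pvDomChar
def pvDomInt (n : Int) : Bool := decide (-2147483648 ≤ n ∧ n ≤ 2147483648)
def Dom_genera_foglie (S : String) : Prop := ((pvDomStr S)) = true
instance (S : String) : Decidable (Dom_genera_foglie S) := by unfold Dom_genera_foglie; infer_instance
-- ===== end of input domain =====

-- B memoizes genera_foglie (a cache threaded through the recursion) and finds the moves by a
-- direct index scan with in-place character checks, computing the replacement digit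
-- arithmetically; each distinct reachable string is reduced at most once. Return value only.

-- ===== PORT A =====
def mosse (S : String) : List Int :=
  (PySem.List.pyRange 0 (PySem.Str.len S - 2) 1).filter
    (fun i => (PySem.Set.diff (PySem.Set.ofList (PySem.List.slice S.toList (some i) (some (i + 3)))) ['1', '0']).isEmpty)

def applica_mossa (S : String) (i : Int) : String :=
  let prima := PySem.List.slice S.toList none (some i)
  let tripla := PySem.List.slice S.toList (some i) (some (i + 3))
  let dopo := PySem.List.slice S.toList (some (i + 3)) none
  -- int(tripla, base=2): exact via PySem.Int.ofCharsBase?; at every call site (i ∈ mosse S)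
  -- the triple is a valid 3-char binary literal, so the '.getD 0' default is never taken.
  let num := PySem.Int.toChars ((PySem.Int.ofCharsBase? tripla 2).getD 0)
  String.ofList (prima ++ num ++ dopo)

-- the next two lemmas are cited by the ports' decreasing_by, so they stay above the ports
lemma bin3_toChars_len (a b c : Char)
    (ha : a = '1' ∨ a = '0') (hb : b = '1' ∨ b = '0') (hc : c = '1' ∨ c = '0') :
    (PySem.Int.toChars ((PySem.Int.ofCharsBase? [a, b, c] 2).getD 0)).length = 1 := by
  rcases ha with rfl | rfl <;> rcases hb with rfl | rfl <;> rcases hc with rfl | rfl <;> decide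

lemma applica_mossa_len (S : String) (m : Int) (hm : m ∈ mosse S) :
    (applica_mossa S m).toList.length + 2 = S.toList.length := by
  obtain ⟨hmem, hpred⟩ := List.mem_filter.mp hm
  rw [PySem.List.mem_pyRange_one] at hmem
  obtain ⟨h0, hlt⟩ := hmem
  obtain ⟨k, rfl⟩ := Int.eq_ofNat_of_zero_le h0
  rw [PySem.Str.len_eq] at hlt
  have hk3 : k + 3 ≤ S.toList.length := by omega
  have htr : PySem.List.slice S.toList (some (k : Int)) (some ((k : Int) + 3)) = (S.toList.drop k).take 3 := by
    have := PySem.List.slice_natCast_add S.toList k 3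
    simpa using this
  have hlen : ((S.toList.drop k).take 3).length = 3 := by
    have hSL : S.toList.length = S.length := by simp
    simp [List.length_take, List.length_drop]; omega
  have hall : ∀ x ∈ (S.toList.drop k).take 3, x = '1' ∨ x = '0' := by
    intro x hx
    rw [htr] at hpred
    by_contra hne
    push Not at hne
    have hxd : x ∈ PySem.Set.diff (PySem.Set.ofList ((S.toList.drop k).take 3)) ['1', '0'] := by
      simp only [PySem.Set.diff, PySem.Set.contains_eq_listContains, List.contains_eq_mem,
        List.mem_filter, PySem.Set.mem_ofList, Bool.not_eq_eq_eq_not, Bool.not_true,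
        decide_eq_false_iff_not]
      exact ⟨hx, by simp [hne.1, hne.2]⟩
    rw [List.isEmpty_iff] at hpred
    simp [hpred] at hxd
  obtain ⟨a, b, c, habc⟩ : ∃ a b c, (S.toList.drop k).take 3 = [a, b, c] := by
    match h : (S.toList.drop k).take 3 with
    | [a, b, c] => exact ⟨a, b, c, rfl⟩
    | [] | [_] | [_, _] | _ :: _ :: _ :: _ :: _ => rw [h] at hlen; simp at hlen
  rw [habc] at hall
  have h1 := bin3_toChars_len a b c (hall a (by simp)) (hall b (by simp)) (hall c (by simp))
  simp only [applica_mossa, htr, habc]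
  rw [PySem.List.slice_to_natCast]
  have : PySem.List.slice S.toList (some ((k : Int) + 3)) none = S.toList.drop (k + 3) := by
    have := PySem.List.slice_from_natCast S.toList (k + 3)
    rw [← this]; norm_num
  rw [this]
  have hSL : S.toList.length = S.length := by simp
  simp [h1, List.length_take, List.length_drop]
  omega

def genera_foglie (S : String) : List String :=
  if PySem.Str.len S < 3 then PySem.Set.ofList [S]
  else if mosse S ≠ [] then
    (mosse S).attach.foldl
      (fun acc mp => PySem.Set.union acc (genera_foglie (applica_mossa S mp.1)))
      PySem.Set.empty
  else PySem.Set.ofList [S]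
termination_by S.toList.length
decreasing_by
  have := applica_mossa_len S mp.1 mp.2
  omega

-- ===== PORT B =====

-- chr(48 + 4*(a=='1') + 2*(b=='1') + (c=='1'))
def bDigit (a b c : Char) : Char :=
  Char.ofNat (48 + (4 * (if a = '1' then 1 else 0) + 2 * (if b = '1' then 1 else 0)
    + (if c = '1' then 1 else 0)))

-- cited by the port's decreasing_by, so it stays above it
lemma child_len (l : List Char) (i : Nat) (d : Char) (h : i < l.length - 2) :
    (String.ofList (l.take i ++ [d] ++ l.drop (i + 3))).toList.length = l.length - 2 := by
  simp [List.length_take, List.length_drop]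
  omega

-- Source B's _leaves(s, cache): memoized recursion; the 'for i in range(len(s)-2)' loop is a fold
-- with state (acc, moved, cache); s[i] / s[i+1] / s[i+2] via getD (i < len(s)-2, so the
-- defaults are never taken: exact)
def gf_leaves (s : String) (cache : PySem.Dict String (List String)) :
    List String × PySem.Dict String (List String) :=
  match cache.get? s with
  | some r => (r, cache)
  | none =>
    let p := (List.range (s.toList.length - 2)).attach.foldl
      (fun st ip =>
        let a := s.toList.getD ip.1 ' '
        let b := s.toList.getD (ip.1 + 1) ' '
        let c := s.toList.getD (ip.1 + 2) ' '
        if (a == '0' || a == '1') && (b == '0' || b == '1') && (c == '0' || c == '1') then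
          let child := String.ofList (s.toList.take ip.1 ++ [bDigit a b c] ++ s.toList.drop (ip.1 + 3))
          let q := gf_leaves child st.2.2
          (PySem.Set.union st.1 q.1, true, q.2)
        else st)
      (PySem.Set.empty, false, cache)
    let r := if p.2.1 then p.1 else PySem.Set.ofList [s]
    (r, p.2.2.insert s r)
termination_by s.toList.length
decreasing_by
  have hi : ip.1 < s.toList.length - 2 := List.mem_range.mp ip.2
  have := child_len s.toList ip.1 (bDigit (s.toList.getD ip.1 ' ') (s.toList.getD (ip.1 + 1) ' ') (s.toList.getD (ip.1 + 2) ' ')) hi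
  omega

def genera_foglie_alt (S : String) : List String :=
  (gf_leaves S PySem.Dict.empty).1

-- ===== PRECONDITION & SPEC =====
def Spec_genera_foglie (S : String) (out : List String) : Prop := out = genera_foglie_alt S
instance (S : String) (out : List String) : Decidable (Spec_genera_foglie S out) := by unfold Spec_genera_foglie; infer_instance

-- ===== CLAIM (what is proved, stated in full; the proofs are below) =====
def Claim_equal_genera_foglie : Prop := ∀ (S : String), Dom_genera_foglie S → Spec_genera_foglie S (genera_foglie S)

-- ===== LEMMAS AND PROOFS =====
-- cache invariant: every stored value is the (uncached) result for its key
def CacheOK (c : PySem.Dict String (List String)) : Prop :=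
  ∀ k r, c.get? k = some r → r = genera_foglie k

lemma cacheok_insert (c : PySem.Dict String (List String)) (hc : CacheOK c)
    (S : String) (r : List String) (hr : r = genera_foglie S) : CacheOK (c.insert S r) := by
  intro k v hk
  rw [PySem.Dict.get?_insert] at hk
  split at hk
  · rename_i hkS; cases hk; subst hkS; exact hr
  · exact hc k v hk

-- the moves of S at positions ≥ i (msFrom S 0 = mosse S)
def msFrom (S : String) (i : Nat) : List Int :=
  (PySem.List.pyRange (i : Int) (PySem.Str.len S - 2) 1).filter
    (fun i => (PySem.Set.diff (PySem.Set.ofList (PySem.List.slice S.toList (some i) (some (i + 3)))) ['1', '0']).isEmpty)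

lemma mosse_eq_msFrom (S : String) : mosse S = msFrom S 0 := by
  simp [mosse, msFrom]

lemma msFrom_nil (S : String) (i : Nat) (h : S.toList.length - 2 ≤ i) : msFrom S i = [] := by
  unfold msFrom
  rw [PySem.List.pyRange_one_eq_nil (by rw [PySem.Str.len_eq]; omega)]
  rfl

lemma drop_take3 (l : List Char) (i : Nat) (h : i + 3 ≤ l.length) :
    (l.drop i).take 3 = [l.getD i ' ', l.getD (i + 1) ' ', l.getD (i + 2) ' '] := by
  have h0 : i < l.length := by omega
  have h1 : i + 1 < l.length := by omega
  have h2 : i + 2 < l.length := by omega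
  rw [List.getD_eq_getElem _ _ h0, List.getD_eq_getElem _ _ h1, List.getD_eq_getElem _ _ h2,
    List.drop_eq_getElem_cons h0, List.drop_eq_getElem_cons h1, List.drop_eq_getElem_cons h2]
  rfl

-- A's triple test on three explicit characters is B's character check
lemma pred_eq (a b c : Char) :
    (PySem.Set.diff (PySem.Set.ofList [a, b, c]) ['1', '0']).isEmpty
      = ((a == '0' || a == '1') && (b == '0' || b == '1') && (c == '0' || c == '1')) := by
  by_cases ha : a = '0' ∨ a = '1'
  · by_cases hb : b = '0' ∨ b = '1'
    · by_cases hc : c = '0' ∨ c = '1'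
      · rcases ha with rfl | rfl <;> rcases hb with rfl | rfl <;> rcases hc with rfl | rfl <;> decide
      · push Not at hc
        have hm : c ∈ PySem.Set.diff (PySem.Set.ofList [a, b, c]) ['1', '0'] := by
          simp only [PySem.Set.diff, PySem.Set.contains_eq_listContains, List.contains_eq_mem,
            List.mem_filter, PySem.Set.mem_ofList, Bool.not_eq_eq_eq_not, Bool.not_true,
            decide_eq_false_iff_not]
          exact ⟨by simp, by simp [hc.1, hc.2]⟩
        rcases hl : PySem.Set.diff (PySem.Set.ofList [a, b, c]) ['1', '0'] with _ | ⟨x, xs⟩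
        · rw [hl] at hm; cases hm
        · simp [hc.1, hc.2]
    · push Not at hb
      have hm : b ∈ PySem.Set.diff (PySem.Set.ofList [a, b, c]) ['1', '0'] := by
        simp only [PySem.Set.diff, PySem.Set.contains_eq_listContains, List.contains_eq_mem,
          List.mem_filter, PySem.Set.mem_ofList, Bool.not_eq_eq_eq_not, Bool.not_true,
          decide_eq_false_iff_not]
        exact ⟨by simp, by simp [hb.1, hb.2]⟩
      rcases hl : PySem.Set.diff (PySem.Set.ofList [a, b, c]) ['1', '0'] with _ | ⟨x, xs⟩
      · rw [hl] at hm; cases hm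
      · simp [hb.1, hb.2]
  · push Not at ha
    have hm : a ∈ PySem.Set.diff (PySem.Set.ofList [a, b, c]) ['1', '0'] := by
      simp only [PySem.Set.diff, PySem.Set.contains_eq_listContains, List.contains_eq_mem,
        List.mem_filter, PySem.Set.mem_ofList, Bool.not_eq_eq_eq_not, Bool.not_true,
        decide_eq_false_iff_not]
      exact ⟨by simp, by simp [ha.1, ha.2]⟩
    rcases hl : PySem.Set.diff (PySem.Set.ofList [a, b, c]) ['1', '0'] with _ | ⟨x, xs⟩
    · rw [hl] at hm; cases hm
    · simp [ha.1, ha.2]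

-- str(int([a,b,c], 2)) for binary chars is the single arithmetic digit of B
lemma tripla_eq (a b c : Char) (ha : a = '0' ∨ a = '1') (hb : b = '0' ∨ b = '1')
    (hc : c = '0' ∨ c = '1') :
    PySem.Int.toChars ((PySem.Int.ofCharsBase? [a, b, c] 2).getD 0) = [bDigit a b c] := by
  rcases ha with rfl | rfl <;> rcases hb with rfl | rfl <;> rcases hc with rfl | rfl <;> decide

lemma slice_triple (S : String) (i : Nat) (h : i + 3 ≤ S.toList.length) :
    PySem.List.slice S.toList (some (i : Int)) (some ((i : Int) + 3))
      = [S.toList.getD i ' ', S.toList.getD (i + 1) ' ', S.toList.getD (i + 2) ' '] := by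
  have h1 := PySem.List.slice_natCast_add S.toList i 3
  rw [show ((i : Int) + 3) = ((i : Int) + ((3 : Nat) : Int)) by norm_num] at *
  rw [h1, drop_take3 S.toList i h]

-- A's applica_mossa at a binary position is B's in-place replacement
lemma applica_eq_child (S : String) (i : Nat) (h : i + 3 ≤ S.toList.length)
    (ha : S.toList.getD i ' ' = '0' ∨ S.toList.getD i ' ' = '1')
    (hb : S.toList.getD (i + 1) ' ' = '0' ∨ S.toList.getD (i + 1) ' ' = '1')
    (hc : S.toList.getD (i + 2) ' ' = '0' ∨ S.toList.getD (i + 2) ' ' = '1') :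
    applica_mossa S (i : Int)
      = String.ofList (S.toList.take i
          ++ [bDigit (S.toList.getD i ' ') (S.toList.getD (i + 1) ' ') (S.toList.getD (i + 2) ' ')]
          ++ S.toList.drop (i + 3)) := by
  have hdopo : PySem.List.slice S.toList (some ((i : Int) + 3)) none = S.toList.drop (i + 3) := by
    have := PySem.List.slice_from_natCast S.toList (i + 3)
    rw [← this]; norm_num
  unfold applica_mossa
  simp only [PySem.List.slice_to_natCast, slice_triple S i h, hdopo, tripla_eq _ _ _ ha hb hc]

-- the fold of B over the remaining indices computes A's fold over the remaining moves,
-- and whether any move exists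
lemma gf_fold_spec (S : String)
    (ihL : ∀ T : String, T.toList.length + 2 = S.toList.length → ∀ c, CacheOK c →
      (gf_leaves T c).1 = genera_foglie T ∧ CacheOK (gf_leaves T c).2) :
    ∀ (k i : Nat), i + k = S.toList.length - 2 →
      ∀ (acc : List String) (moved : Bool) (c : PySem.Dict String (List String)), CacheOK c →
      ((List.range' i k).foldl
        (fun st j =>
        let a := S.toList.getD j ' '
        let b := S.toList.getD (j + 1) ' '
        let cc := S.toList.getD (j + 2) ' '
        if (a == '0' || a == '1') && (b == '0' || b == '1') && (cc == '0' || cc == '1') then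
          let child := String.ofList (S.toList.take j ++ [bDigit a b cc] ++ S.toList.drop (j + 3))
          let q := gf_leaves child st.2.2
          (PySem.Set.union st.1 q.1, true, q.2)
        else st)
        (acc, moved, c)).1
          = (msFrom S i).foldl
              (fun acc m => PySem.Set.union acc (genera_foglie (applica_mossa S m))) acc
      ∧ ((List.range' i k).foldl
        (fun st j =>
        let a := S.toList.getD j ' '
        let b := S.toList.getD (j + 1) ' '
        let cc := S.toList.getD (j + 2) ' '
        if (a == '0' || a == '1') && (b == '0' || b == '1') && (cc == '0' || cc == '1') then
          let child := String.ofList (S.toList.take j ++ [bDigit a b cc] ++ S.toList.drop (j + 3))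
          let q := gf_leaves child st.2.2
          (PySem.Set.union st.1 q.1, true, q.2)
        else st)
        (acc, moved, c)).2.1 = (moved || !(msFrom S i).isEmpty)
      ∧ CacheOK ((List.range' i k).foldl
        (fun st j =>
        let a := S.toList.getD j ' '
        let b := S.toList.getD (j + 1) ' '
        let cc := S.toList.getD (j + 2) ' '
        if (a == '0' || a == '1') && (b == '0' || b == '1') && (cc == '0' || cc == '1') then
          let child := String.ofList (S.toList.take j ++ [bDigit a b cc] ++ S.toList.drop (j + 3))
          let q := gf_leaves child st.2.2
          (PySem.Set.union st.1 q.1, true, q.2)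
        else st)
        (acc, moved, c)).2.2 := by
  intro k
  induction k with
  | zero =>
    intro i hk acc moved c hc
    have hge : S.toList.length - 2 ≤ i := by omega
    rw [List.range'_zero, msFrom_nil S i hge]
    exact ⟨rfl, by simp, hc⟩
  | succ k ih =>
    intro i hk acc moved c hc
    have hi : i < S.toList.length - 2 := by omega
    have h3 : i + 3 ≤ S.toList.length := by omega
    have hcons : msFrom S i
        = (if (PySem.Set.diff (PySem.Set.ofList (PySem.List.slice S.toList (some (i : Int)) (some ((i : Int) + 3)))) ['1', '0']).isEmpty
            then [(i : Int)] else []) ++ msFrom S (i + 1) := by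
      unfold msFrom
      rw [PySem.List.pyRange_one_cons (by rw [PySem.Str.len_eq]; omega), List.filter_cons]
      push_cast
      split <;> simp
    rw [slice_triple S i h3, pred_eq] at hcons
    rw [List.range'_succ, List.foldl_cons]
    by_cases hbit : ((S.toList.getD i ' ' == '0' || S.toList.getD i ' ' == '1')
        && (S.toList.getD (i + 1) ' ' == '0' || S.toList.getD (i + 1) ' ' == '1')
        && (S.toList.getD (i + 2) ' ' == '0' || S.toList.getD (i + 2) ' ' == '1')) = true
    · simp only [hbit, if_pos]
      have hbits := hbit
      simp only [Bool.and_eq_true, Bool.or_eq_true, beq_iff_eq] at hbits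
      have hclen : (String.ofList (S.toList.take i
          ++ [bDigit (S.toList.getD i ' ') (S.toList.getD (i + 1) ' ') (S.toList.getD (i + 2) ' ')]
          ++ S.toList.drop (i + 3))).toList.length + 2 = S.toList.length := by
        rw [child_len S.toList i _ hi]; omega
      obtain ⟨hq1, hq2⟩ := ihL _ hclen c hc
      obtain ⟨h1, h2, h3'⟩ := ih (i + 1) (by omega)
        (PySem.Set.union acc (gf_leaves (String.ofList (S.toList.take i
          ++ [bDigit (S.toList.getD i ' ') (S.toList.getD (i + 1) ' ') (S.toList.getD (i + 2) ' ')]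
          ++ S.toList.drop (i + 3))) c).1) true _ hq2
      refine ⟨?_, ?_, h3'⟩
      · rw [h1, hcons, if_pos hbit]
        rw [hq1, ← applica_eq_child S i h3 hbits.1.1 hbits.1.2 hbits.2]
        rfl
      · rw [h2, hcons, if_pos hbit]
        simp
    · simp only [hbit, if_false, Bool.false_eq_true]
      obtain ⟨h1, h2, h3'⟩ := ih (i + 1) (by omega) acc moved c hc
      rw [hcons, if_neg hbit]
      exact ⟨by rw [h1]; rfl, by rw [h2]; rfl, h3'⟩

lemma mosse_nil_of_short (S : String) (h : PySem.Str.len S < 3) : mosse S = [] := by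
  rw [mosse_eq_msFrom]
  exact msFrom_nil S 0 (by rw [PySem.Str.len_eq] at h; omega)

-- the memoized recursion of B returns A's value and preserves the cache invariant
lemma gf_leaves_spec : ∀ (n : Nat) (S : String), S.toList.length ≤ n →
    ∀ c, CacheOK c → (gf_leaves S c).1 = genera_foglie S ∧ CacheOK (gf_leaves S c).2 := by
  intro n
  induction n using Nat.strong_induction_on with
  | _ n ih =>
  intro S hs c hc
  rw [gf_leaves]
  cases hget : c.get? S with
  | some r => exact ⟨hc S r hget, hc⟩
  | none =>
    have ihL : ∀ T : String, T.toList.length + 2 = S.toList.length → ∀ c, CacheOK c →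
        (gf_leaves T c).1 = genera_foglie T ∧ CacheOK (gf_leaves T c).2 := by
      intro T hT c' hc'
      exact ih (S.toList.length - 2) (by omega) T (by omega) c' hc'
    have hst : ((List.range (S.toList.length - 2)).attach.foldl
        (fun st ip =>
        let a := S.toList.getD ip.1 ' '
        let b := S.toList.getD (ip.1 + 1) ' '
        let cc := S.toList.getD (ip.1 + 2) ' '
        if (a == '0' || a == '1') && (b == '0' || b == '1') && (cc == '0' || cc == '1') then
          let child := String.ofList (S.toList.take ip.1 ++ [bDigit a b cc] ++ S.toList.drop (ip.1 + 3))
          let q := gf_leaves child st.2.2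
          (PySem.Set.union st.1 q.1, true, q.2)
        else st)
        (PySem.Set.empty, false, c))
        = ((List.range' 0 (S.toList.length - 2)).foldl
        (fun st j =>
        let a := S.toList.getD j ' '
        let b := S.toList.getD (j + 1) ' '
        let cc := S.toList.getD (j + 2) ' '
        if (a == '0' || a == '1') && (b == '0' || b == '1') && (cc == '0' || cc == '1') then
          let child := String.ofList (S.toList.take j ++ [bDigit a b cc] ++ S.toList.drop (j + 3))
          let q := gf_leaves child st.2.2
          (PySem.Set.union st.1 q.1, true, q.2)
        else st)
        (PySem.Set.empty, false, c)) := by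
      rw [← List.range_eq_range']
      exact List.foldl_attach (f := fun st j =>
        let a := S.toList.getD j ' '
        let b := S.toList.getD (j + 1) ' '
        let cc := S.toList.getD (j + 2) ' '
        if (a == '0' || a == '1') && (b == '0' || b == '1') && (cc == '0' || cc == '1') then
          let child := String.ofList (S.toList.take j ++ [bDigit a b cc] ++ S.toList.drop (j + 3))
          let q := gf_leaves child st.2.2
          (PySem.Set.union st.1 q.1, true, q.2)
        else st)
    obtain ⟨h1, h2, h3⟩ := gf_fold_spec S ihL (S.toList.length - 2) 0 (by omega)
      PySem.Set.empty false c hc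
    rw [← mosse_eq_msFrom] at h1 h2
    simp only [hst]
    by_cases hm : mosse S = []
    · have hmv : ((List.range' 0 (S.toList.length - 2)).foldl
        (fun st j =>
        let a := S.toList.getD j ' '
        let b := S.toList.getD (j + 1) ' '
        let cc := S.toList.getD (j + 2) ' '
        if (a == '0' || a == '1') && (b == '0' || b == '1') && (cc == '0' || cc == '1') then
          let child := String.ofList (S.toList.take j ++ [bDigit a b cc] ++ S.toList.drop (j + 3))
          let q := gf_leaves child st.2.2
          (PySem.Set.union st.1 q.1, true, q.2)
        else st)
        (PySem.Set.empty, false, c)).2.1 = false := by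
        rw [h2, hm]; rfl
      have hgen : genera_foglie S = PySem.Set.ofList [S] := by
        rw [genera_foglie]
        by_cases hlen : PySem.Str.len S < 3
        · rw [if_pos hlen]
        · rw [if_neg hlen, if_neg (by simpa using hm)]
      simp only [hmv, Bool.false_eq_true, if_false]
      exact ⟨hgen.symm, cacheok_insert _ h3 S _ hgen.symm⟩
    · have hmv : ((List.range' 0 (S.toList.length - 2)).foldl
        (fun st j =>
        let a := S.toList.getD j ' '
        let b := S.toList.getD (j + 1) ' '
        let cc := S.toList.getD (j + 2) ' '
        if (a == '0' || a == '1') && (b == '0' || b == '1') && (cc == '0' || cc == '1') then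
          let child := String.ofList (S.toList.take j ++ [bDigit a b cc] ++ S.toList.drop (j + 3))
          let q := gf_leaves child st.2.2
          (PySem.Set.union st.1 q.1, true, q.2)
        else st)
        (PySem.Set.empty, false, c)).2.1 = true := by
        rw [h2]; simp [hm]
      have hlen : ¬ PySem.Str.len S < 3 := fun hlt => hm (mosse_nil_of_short S hlt)
      have hgen : genera_foglie S
          = (mosse S).foldl
              (fun acc m => PySem.Set.union acc (genera_foglie (applica_mossa S m)))
              PySem.Set.empty := by
        rw [genera_foglie, if_neg hlen, if_pos hm]
        exact List.foldl_attach (f := fun acc m => PySem.Set.union acc (genera_foglie (applica_mossa S m)))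
      simp only [hmv, if_true]
      exact ⟨h1.trans hgen.symm, cacheok_insert _ h3 S _ (h1.trans hgen.symm)⟩

-- ===== VERDICT (by name: the statement is the Claim_ definition above) =====
theorem genera_foglie_spec : Claim_equal_genera_foglie := by
  intro S _
  unfold Spec_genera_foglie genera_foglie_alt
  have := gf_leaves_spec S.toList.length S le_rfl PySem.Dict.empty
    (by intro k r hk; rw [PySem.Dict.get?_empty] at hk; cases hk)
  exact this.1.symm
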